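-- pv_equiv track=rewrite | github.com/TribbianniSun/CodeSignal-Interview-Practice | 04-Tree-Basics/07-findSubstrings.py | findSubstrings
-- ===== SOURCE A (Python) =====
-- class TrieTree(object):
--
--     # how he build the tree is jsut amazing
--     def __init__(self):
--         self.children = {}
--         self.isWord = False
--
--     def insertWord(self, word):
--         if not word:
--             self.isWord = True
--         else:
--             self.children.setdefault(ord(word[0]), TrieTree()).insertWord(word[1:])
--
--             # words[i] = "%s[%s]%s" % (w[:pos], w[pos:pos+L], w[pos+L:])
--
--     def customSearch(self, w):
--         pos = len(w)
--         L = -1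
--         for j in range(len(w)):
--             t = self
--             k = j
--             while k < len(w) and ord(w[k]) in t.children:
--                 t = t.children[ord(w[k])]
--                 k += 1
--                 if t.isWord and k - j > L:
--                     L = k - j
--                     pos = j
--
--         if L > 0:
--             return [pos, pos + L]
--         return []
--
-- def findSubstrings(words, parts):
--
--     # step1, build the trie tree
--     myTrieTree = TrieTree()
--
--     for i, part in enumerate(parts):
--         myTrieTree.insertWord(part)
--
--
--
--     # step2, for each index, try to find the result
--
--     for i, word in enumerate(words):
--         ret = myTrieTree.customSearch(word)
--         if(len(ret) == 0):
--             continue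
--         else:
--             idx1 = ret[0]
--             idx2 = ret[1]
--             words[i] = "%s[%s]%s" % (word[:idx1], word[idx1:idx2], word[idx2:])
--
--     return words
-- ===== SOURCE B (Python) =====
-- def _best(w, pset, maxlen):
--     # scan candidate lengths from longest to shortest, positions left to right;
--     # the first hit is the longest match, leftmost among equals
--     top = min(maxlen, len(w))
--     for L in range(top, 0, -1):
--         for j in range(len(w) - L + 1):
--             if w[j:j + L] in pset:
--                 return (j, j + L)
--     return None
--
-- def findSubstrings(words, parts):
--     pset = set(p for p in parts if p)
--     maxlen = max((len(p) for p in pset), default=0)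
--     for i, word in enumerate(words):
--         m = _best(word, pset, maxlen)
--         if m is not None:
--             words[i] = "%s[%s]%s" % (word[:m[0]], word[m[0]:m[1]], word[m[1]:])
--     return words
-- ===== Notes on version B (the rewrite author's own statement) =====
-- stated objective: faster
-- what changed: Replaces the character trie and per-position while-extension walk with a hash set of the parts that is probed by candidate length in descending order (positions left to right) with early exit on the first hit, which is the longest, leftmost match.
import Mathlib
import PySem

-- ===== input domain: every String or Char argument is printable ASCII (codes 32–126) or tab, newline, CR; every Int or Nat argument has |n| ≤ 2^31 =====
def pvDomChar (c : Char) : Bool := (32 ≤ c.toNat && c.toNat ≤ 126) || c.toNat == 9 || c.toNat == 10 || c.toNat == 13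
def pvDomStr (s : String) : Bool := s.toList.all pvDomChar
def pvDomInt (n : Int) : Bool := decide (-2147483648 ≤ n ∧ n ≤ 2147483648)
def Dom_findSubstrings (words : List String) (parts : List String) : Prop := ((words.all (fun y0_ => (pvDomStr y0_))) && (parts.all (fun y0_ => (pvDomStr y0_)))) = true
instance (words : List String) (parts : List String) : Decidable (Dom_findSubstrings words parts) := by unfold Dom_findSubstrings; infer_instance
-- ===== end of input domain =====

-- B replaces A's trie walk by a hash-set of parts probed by candidate length descending (constant-factor faster in the
-- timing run); A rewrites `words` in place and returns it, B performs the same in-place rewrite — return values agree.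

-- ===== PORT A =====
-- TrieTree: `children` is a dict keyed by ord(char); ported as a mutual pair (no nested inductive).
mutual
inductive Trie : Type where
  | mk : Bool → TrieC → Trie
inductive TrieC : Type where          -- the association list behind `self.children`
  | nil : TrieC
  | cons : Int → Trie → TrieC → TrieC
end

def pyOrd (c : Char) : Int := (c.toNat : Int)    -- ord(c)

def Trie.isWord : Trie → Bool
  | .mk b _ => b

def Trie.children : Trie → TrieC
  | .mk _ ch => ch

def TrieC.get? : TrieC → Int → Option Trie       -- `t.children[k]` / `k in t.children`
  | .nil, _ => none
  | .cons k t rest, q => if k = q then some t else TrieC.get? rest q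

mutual
-- insertWord: `self.children.setdefault(ord(word[0]), TrieTree()).insertWord(word[1:])`
def Trie.insertWord : Trie → List Char → Trie
  | .mk _ ch, [] => .mk true ch
  | .mk b ch, c :: s => .mk b (TrieC.setdefaultIns ch (pyOrd c) s)
  termination_by t s => (s.length, 0, 0)
-- setdefault(k, TrieTree()) followed by the recursive insert on that child
def TrieC.setdefaultIns : TrieC → Int → List Char → TrieC
  | .nil, q, s => .cons q (Trie.insertWord (.mk false .nil) s) .nil
  | .cons k t rest, q, s =>
      if k = q then .cons k (Trie.insertWord t s) rest
      else .cons k t (TrieC.setdefaultIns rest q s)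
  termination_by ch q s => (s.length, 1, sizeOf ch)
end

-- the `while k < len(w) and ord(w[k]) in t.children:` loop of customSearch, state (pos, L)
def Trie.walk : Trie → List Char → Nat → Nat → Int × Int → Int × Int
  | t, w, j, k, (pos, L) =>
    if h : k < w.length then
      match TrieC.get? t.children (pyOrd w[k]) with
      | none => (pos, L)
      | some t' =>
          let k' := k + 1
          let pL := if t'.isWord ∧ ((k' : Int) - (j : Int) > L) then ((j : Int), (k' : Int) - (j : Int))
                    else (pos, L)
          Trie.walk t' w j k' pL
    else (pos, L)
  termination_by t w j k pL => w.length - k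

def Trie.customSearch (t : Trie) (w : List Char) : List Int :=
  let n := w.length
  let pL := (List.range n).foldl (fun pL j => Trie.walk t w j j pL) ((n : Int), -1)
  if pL.2 > 0 then [pL.1, pL.1 + pL.2] else []

-- step1: for part in parts: myTrieTree.insertWord(part)
def buildTrie (parts : List String) : Trie :=
  parts.foldl (fun t p => Trie.insertWord t p.toList) (.mk false .nil)

-- step2: `for i, word in enumerate(words): ... words[i] = ...`; each iteration reads index i before writing it,
-- so enumerating the initial list is exact.
def findSubstrings (words : List String) (parts : List String) : List String :=
  let tree := buildTrie parts
  (PySem.List.enumerate words 0).foldl (fun ws iw =>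
    let ret := Trie.customSearch tree iw.2.toList
    if ret.length = 0 then ws
    else
      let idx1 := PySem.List.pyGetD ret 0 0
      let idx2 := PySem.List.pyGetD ret 1 0
      PySem.List.pySetD ws iw.1 (String.ofList
        (PySem.List.slice iw.2.toList none (some idx1) ++
         '[' :: PySem.List.slice iw.2.toList (some idx1) (some idx2) ++
         ']' :: PySem.List.slice iw.2.toList (some idx2) none))) words

-- ===== PORT B =====
-- inner loop of _best: `for j in range(len(w) - L + 1): if w[j:j+L] in pset: return (j, j+L)`
def bestLoopJ (w : List Char) (pset : PySem.Set String) (L j : Nat) : Option (Nat × Nat) :=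
  if j + L ≤ w.length then
    if PySem.Set.contains pset (String.ofList ((w.drop j).take L)) then some (j, j + L)
    else bestLoopJ w pset L (j + 1)
  else none
  termination_by w.length + 1 - j
  decreasing_by omega

-- outer loop of _best: `for L in range(top, 0, -1)`
def bestLoopL (w : List Char) (pset : PySem.Set String) (L : Nat) : Option (Nat × Nat) :=
  if L = 0 then none
  else
    match bestLoopJ w pset L 0 with
    | some r => some r
    | none => bestLoopL w pset (L - 1)

def findSubstrings_alt (words : List String) (parts : List String) : List String :=
  let pset : PySem.Set String := PySem.Set.ofList (parts.filter (fun p => !(p == "")))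
  let maxlen : Nat := (pset.map (fun p => p.toList.length)).foldl max 0
  words.map (fun word =>
    match bestLoopL word.toList pset (min maxlen word.toList.length) with
    | none => word
    | some (j, k) => String.ofList
        (word.toList.take j ++ '[' :: ((word.toList.drop j).take (k - j)) ++ ']' :: word.toList.drop k))

-- ===== PRECONDITION & SPEC =====
def Spec_findSubstrings (words : List String) (parts : List String) (out : List String) : Prop := out = findSubstrings_alt words parts
instance (words : List String) (parts : List String) (out : List String) : Decidable (Spec_findSubstrings words parts out) := by unfold Spec_findSubstrings; infer_instance

-- ===== CLAIM (what is proved, stated in full; the proofs are below) =====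
def Claim_equal_findSubstrings : Prop := ∀ (words : List String) (parts : List String), Dom_findSubstrings words parts → Spec_findSubstrings words parts (findSubstrings words parts)

-- ===== LEMMAS AND PROOFS =====

-- membership of a char list in the word set stored in a trie
def memT : Trie → List Char → Bool
  | .mk b _, [] => b
  | .mk _ ch, c :: s =>
      match TrieC.get? ch (pyOrd c) with
      | none => false
      | some t => memT t s
  termination_by t s => s.length

-- length of the longest nonempty prefix of l that is a word of the trie (0 if none)
def bestLen : Trie → List Char → Nat
  | _, [] => 0
  | .mk _ ch, c :: l =>
      match TrieC.get? ch (pyOrd c) with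
      | none => 0
      | some t' =>
          let r := bestLen t' l
          if 0 < r then r + 1 else if t'.isWord then 1 else 0
  termination_by t l => l.length

theorem pyOrd_inj {c c' : Char} (h : pyOrd c = pyOrd c') : c = c' := by
  have h2 : c.toNat = c'.toNat := Int.natCast_inj.mp (by simpa [pyOrd] using h)
  apply Char.ext; apply UInt32.toBitVec_inj.mp; apply BitVec.toNat_inj.mp; exact h2

theorem memT_empty (s : List Char) : memT (.mk false .nil) s = false := by
  cases s <;> simp [memT, TrieC.get?]

theorem get?_setdefaultIns (ch : TrieC) (q q' : Int) (u : List Char) :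
    TrieC.get? (TrieC.setdefaultIns ch q u) q' =
      if q' = q then some (Trie.insertWord ((TrieC.get? ch q).getD (.mk false .nil)) u)
      else TrieC.get? ch q' := by
  match ch with
  | .nil =>
      by_cases h : q' = q <;> simp [TrieC.setdefaultIns, TrieC.get?, h] <;> intro h2 <;> simp_all
  | .cons k t rest =>
      by_cases hk : k = q
      · subst hk
        by_cases h : q' = k
        · simp [TrieC.setdefaultIns, TrieC.get?, h]
        · simp [TrieC.setdefaultIns, TrieC.get?, h, Ne.symm h]
      · have ih := get?_setdefaultIns rest q q' u
        by_cases h : q' = q <;> by_cases h2 : k = q' <;>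
          simp_all [TrieC.setdefaultIns, TrieC.get?]
termination_by sizeOf ch

theorem memT_insert (t : Trie) (u s : List Char) :
    memT (Trie.insertWord t u) s = (s == u || memT t s) := by
  match t, u, s with
  | .mk b ch, [], [] => simp [Trie.insertWord, memT]
  | .mk b ch, [], c' :: s2 => simp [Trie.insertWord, memT]
  | .mk b ch, c :: u2, [] => simp [Trie.insertWord, memT]
  | .mk b ch, c :: u2, c' :: s2 =>
      simp only [Trie.insertWord, memT, get?_setdefaultIns]
      by_cases hc : pyOrd c' = pyOrd c
      · have hcc : c' = c := pyOrd_inj hc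
        subst hcc
        cases hg : TrieC.get? ch (pyOrd c') with
        | none =>
            simp [memT_insert (Trie.mk false TrieC.nil) u2 s2, memT_empty]
        | some t0 =>
            simp [memT_insert t0 u2 s2]
      · have hcc : ¬ (c' == c) = true := fun e => hc (by rw [eq_of_beq e])
        simp [hc, hcc]
termination_by u.length

theorem memT_foldl (ps : List String) (t : Trie) (s : List Char) :
    memT (ps.foldl (fun t p => Trie.insertWord t p.toList) t) s
      = (ps.any (fun p => p.toList == s) || memT t s) := by
  induction ps generalizing t with
  | nil => simp
  | cons p ps ih =>
      have hb : (s == p.toList) = (p.toList == s) := by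
        by_cases hb1 : s = p.toList
        · simp [hb1]
        · simp [hb1, Ne.symm hb1]
      simp [ih, memT_insert, hb, Bool.or_comm, Bool.or_left_comm, Bool.or_assoc]

theorem memT_buildTrie (parts : List String) (s : List Char) :
    memT (buildTrie parts) s = parts.any (fun p => p.toList == s) := by
  simp [buildTrie, memT_foldl, memT_empty]


-- ---- characterisation of bestLen ----

theorem memT_nil (t : Trie) : memT t [] = t.isWord := by
  cases t; rw [memT, Trie.isWord]

theorem bestLen_le (t : Trie) (l : List Char) : bestLen t l ≤ l.length := by
  match t, l with
  | t, [] => simp [bestLen]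
  | .mk b ch, c :: l =>
      rw [bestLen]
      cases hg : TrieC.get? ch (pyOrd c) with
      | none => simp
      | some t' =>
          have := bestLen_le t' l
          simp only []
          split_ifs <;> simp <;> omega
termination_by l.length

theorem bestLen_mem (t : Trie) (l : List Char) (h : 0 < bestLen t l) :
    memT t (l.take (bestLen t l)) = true := by
  match t, l with
  | t, [] => simp [bestLen] at h
  | .mk b ch, c :: l =>
      rw [bestLen] at h ⊢
      cases hg : TrieC.get? ch (pyOrd c) with
      | none => simp [hg] at h
      | some t' =>
          simp only [hg] at h ⊢
          by_cases hr : 0 < bestLen t' l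
          · simp only [if_pos hr] at h ⊢
            have ih := bestLen_mem t' l hr
            simp [List.take_succ_cons, memT, hg, ih]
          · simp only [if_neg hr] at h ⊢
            by_cases hw : t'.isWord = true
            · simp [hw, List.take_succ_cons, memT, hg, memT_nil]
            · simp [hw] at h
termination_by l.length

theorem le_bestLen (t : Trie) (l : List Char) (m : Nat) (h1 : 0 < m) (h2 : m ≤ l.length)
    (h3 : memT t (l.take m) = true) : m ≤ bestLen t l := by
  match t, l with
  | t, [] => simp at h2; omega
  | .mk b ch, c :: l =>
      obtain ⟨m', rfl⟩ : ∃ m', m = m' + 1 := ⟨m - 1, by omega⟩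
      rw [List.take_succ_cons, memT] at h3
      cases hg : TrieC.get? ch (pyOrd c) with
      | none => simp [hg] at h3
      | some t' =>
          simp only [hg] at h3
          rw [bestLen]
          simp only [hg]
          by_cases hm' : 0 < m'
          · have ih := le_bestLen t' l m' hm' (by simpa using h2) h3
            split_ifs <;> omega
          · have hm0 : m' = 0 := by omega
            subst hm0
            rw [List.take_zero, memT_nil] at h3
            split_ifs with hr hw
            · omega
            · omega
termination_by l.length

-- ---- the while loop of customSearch computes the longest trie word starting at k ----

theorem walk_spec (t : Trie) (w : List Char) (j k : Nat) (pos L : Int) :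
    Trie.walk t w j k (pos, L) =
      (if 0 < bestLen t (w.drop k) ∧ ((k : Int) - (j : Int) + (bestLen t (w.drop k) : Int) > L)
       then ((j : Int), (k : Int) - (j : Int) + (bestLen t (w.drop k) : Int))
       else (pos, L)) := by
  rw [Trie.walk.eq_def]
  by_cases h : k < w.length
  · have hd : w.drop k = w[k] :: w.drop (k + 1) := (List.getElem_cons_drop h).symm
    obtain ⟨b, ch⟩ := t
    rw [hd, bestLen]
    simp only [dif_pos h, Trie.children]
    cases hg : TrieC.get? ch (pyOrd w[k]) with
    | none => simp
    | some t' =>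
        have ih := walk_spec t' w j (k + 1)
        simp only [hg]
        cases hw : t'.isWord with
        | true =>
          simp only [hw, eq_self_iff_true, true_and]
          by_cases hu : ((k + 1 : Nat) : Int) - (j : Int) > L
          · rw [if_pos hu, ih]
            split_ifs <;> simp only [Prod.mk.injEq, true_and, and_true] <;> omega
          · rw [if_neg hu, ih]
            split_ifs <;> simp only [Prod.mk.injEq, true_and, and_true] <;> omega
        | false =>
          simp only [hw, Bool.false_eq_true, false_and, if_false]
          rw [ih]
          split_ifs <;> simp only [Prod.mk.injEq, true_and, and_true] <;> omega
  · have hd : w.drop k = [] := List.drop_eq_nil_of_le (by omega)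
    rw [hd]
    simp [dif_neg h, bestLen]
termination_by w.length - k
decreasing_by omega

-- ---- the fold over start positions keeps the longest match, first position on ties ----

theorem foldA_inv (tree : Trie) (w : List Char) (m : Nat) :
    ((List.range m).foldl (fun pL j => Trie.walk tree w j j pL) ((w.length : Int), -1)
        = ((w.length : Int), -1) ∧ ∀ j, j < m → bestLen tree (w.drop j) = 0)
     ∨ (∃ js, js < m
          ∧ (List.range m).foldl (fun pL j => Trie.walk tree w j j pL) ((w.length : Int), -1)
              = ((js : Int), (bestLen tree (w.drop js) : Int))
          ∧ 0 < bestLen tree (w.drop js)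
          ∧ (∀ j, j < m → bestLen tree (w.drop j) ≤ bestLen tree (w.drop js))
          ∧ (∀ j, j < js → bestLen tree (w.drop j) < bestLen tree (w.drop js))) := by
  induction m with
  | zero => exact Or.inl ⟨rfl, fun j hj => absurd hj (by omega)⟩
  | succ m ih =>
      rw [List.range_succ, List.foldl_append, List.foldl_cons, List.foldl_nil]
      obtain ⟨heq, hz⟩ | ⟨js, hjs, heq, hpos, hmax, hfirst⟩ := ih
      · rw [heq, walk_spec]
        by_cases hc : 0 < bestLen tree (w.drop m)
        · right
          refine ⟨m, by omega, ?_, hc, ?_, ?_⟩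
          · rw [if_pos ⟨hc, by push_cast; omega⟩]
            simp
          · intro j hj
            rcases Nat.lt_succ_iff_lt_or_eq.mp hj with hj' | rfl
            · rw [hz j hj']; omega
            · exact le_refl _
          · intro j hj; rw [hz j hj]; exact hc
        · left
          refine ⟨?_, ?_⟩
          · rw [if_neg (by intro hcc; exact hc hcc.1)]
          · intro j hj
            rcases Nat.lt_succ_iff_lt_or_eq.mp hj with hj' | rfl
            · exact hz j hj'
            · omega
      · rw [heq, walk_spec]
        by_cases hc : 0 < bestLen tree (w.drop m) ∧
            ((m : Int) - (m : Int) + (bestLen tree (w.drop m) : Int) > (bestLen tree (w.drop js) : Int))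
        · right
          have hlt : bestLen tree (w.drop js) < bestLen tree (w.drop m) := by
            have := hc.2; omega
          refine ⟨m, by omega, ?_, hc.1, ?_, ?_⟩
          · rw [if_pos hc]; simp
          · intro j hj
            rcases Nat.lt_succ_iff_lt_or_eq.mp hj with hj' | rfl
            · exact le_trans (hmax j hj') (le_of_lt hlt)
            · exact le_refl _
          · intro j hj
            rcases Nat.lt_or_ge j js with hj' | hj'
            · exact lt_of_lt_of_le (hfirst j hj') (le_of_lt hlt)
            · exact lt_of_le_of_lt (hmax j hj) hlt
        · right
          refine ⟨js, by omega, ?_, hpos, ?_, hfirst⟩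
          · rw [if_neg hc]
          · intro j hj
            rcases Nat.lt_succ_iff_lt_or_eq.mp hj with hj' | rfl
            · exact hmax j hj'
            · by_cases h0 : 0 < bestLen tree (w.drop j)
              · have : ¬ ((j : Int) - (j : Int) + (bestLen tree (w.drop j) : Int) > (bestLen tree (w.drop js) : Int)) := fun hgt => hc ⟨h0, hgt⟩
                omega
              · omega

-- ---- characterisation of B's two search loops ----

def QB (w : List Char) (pset : PySem.Set String) (i L : Nat) : Prop :=
  i + L ≤ w.length ∧ PySem.Set.contains pset (String.ofList ((w.drop i).take L)) = true

theorem bestLoopJ_none (w : List Char) (pset : PySem.Set String) (L j : Nat)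
    (h : ∀ i, j ≤ i → ¬ QB w pset i L) : bestLoopJ w pset L j = none := by
  rw [bestLoopJ]
  split_ifs with h1 h2
  · exact absurd ⟨h1, h2⟩ (h j (le_refl j))
  · exact bestLoopJ_none w pset L (j + 1) (fun i hi => h i (by omega))
  · rfl
termination_by w.length + 1 - j
decreasing_by omega

theorem bestLoopJ_some (w : List Char) (pset : PySem.Set String) (L j j' : Nat)
    (hj : j ≤ j') (hq : QB w pset j' L) (hmin : ∀ i, j ≤ i → i < j' → ¬ QB w pset i L) :
    bestLoopJ w pset L j = some (j', j' + L) := by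
  rw [bestLoopJ]
  rcases Nat.eq_or_lt_of_le hj with rfl | hlt
  · rw [if_pos hq.1, if_pos hq.2]
  · have h1 : j + L ≤ w.length := by have := hq.1; omega
    rw [if_pos h1]
    have hcf : PySem.Set.contains pset (String.ofList ((w.drop j).take L)) = false := by
      cases hcc : PySem.Set.contains pset (String.ofList ((w.drop j).take L)) with
      | true => exact absurd ⟨h1, hcc⟩ (hmin j (le_refl j) hlt)
      | false => rfl
    rw [hcf, if_neg (by simp)]
    exact bestLoopJ_some w pset L (j + 1) j' (by omega) hq (fun i hi1 hi2 => hmin i (by omega) hi2)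
termination_by j' - j
decreasing_by omega

theorem bestLoopL_none (w : List Char) (pset : PySem.Set String) (top : Nat)
    (h : ∀ L, 0 < L → L ≤ top → ∀ i, ¬ QB w pset i L) : bestLoopL w pset top = none := by
  induction top with
  | zero => rw [bestLoopL]; simp
  | succ t iht =>
      rw [bestLoopL]
      rw [bestLoopJ_none w pset (t + 1) 0 (fun i _ => h (t + 1) (by omega) (by omega) i)]
      simp only [Nat.add_sub_cancel]
      rw [if_neg (by omega)]
      exact iht (fun L h1 h2 i => h L h1 (by omega) i)

theorem bestLoopL_some (w : List Char) (pset : PySem.Set String) (top M js : Nat)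
    (hM : 0 < M) (hMtop : M ≤ top) (hq : QB w pset js M)
    (hfirst : ∀ i, i < js → ¬ QB w pset i M)
    (hmax : ∀ L, M < L → ∀ i, ¬ QB w pset i L) :
    bestLoopL w pset top = some (js, js + M) := by
  match top with
  | 0 => omega
  | t + 1 =>
      rw [bestLoopL, if_neg (by omega)]
      by_cases he : M = t + 1
      · rw [he] at hq hfirst
        rw [bestLoopJ_some w pset (t + 1) 0 js (Nat.zero_le _) hq (fun i _ hi2 => hfirst i hi2)]
        rw [he]
      · have hMt : M ≤ t := by omega
        rw [bestLoopJ_none w pset (t + 1) 0 (fun i _ => hmax (t + 1) (by omega) i)]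
        simp only [Nat.add_sub_cancel]
        exact bestLoopL_some w pset t M js hM hMt hq hfirst hmax
termination_by top

-- ---- bridge: set membership of a substring = trie membership ----

theorem contains_iff_memT (parts : List String) (s : List Char) (hs : s ≠ []) :
    PySem.Set.contains (PySem.Set.ofList (parts.filter (fun p => !(p == "")))) (String.ofList s)
      = memT (buildTrie parts) s := by
  rw [memT_buildTrie]
  by_cases h : ∃ p ∈ parts, p.toList = s
  · obtain ⟨p, hp, hps⟩ := h
    have h1 : (parts.any fun p => p.toList == s) = true := by
      rw [List.any_eq_true]; exact ⟨p, hp, by simp [hps]⟩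
    rw [h1]
    have hmem : String.ofList s ∈ PySem.Set.ofList (parts.filter fun p => !(p == "")) := by
      rw [PySem.Set.mem_ofList, List.mem_filter]
      have hos : String.ofList s = p := by rw [← hps]; simp
      refine ⟨hos ▸ hp, by
        rcases eq_or_ne p "" with rfl | hne
        · simp at hps; exact absurd hps hs
        · simp [hne] <;> exact hs⟩
    exact (PySem.Set.contains_iff _ _).mpr hmem
  · have h1 : (parts.any fun p => p.toList == s) = false := by
      rw [List.any_eq_false]
      intro p hp
      simp only [beq_iff_eq]
      exact fun he => h ⟨p, hp, he⟩
    rw [h1]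
    cases hcc : PySem.Set.contains (PySem.Set.ofList (parts.filter fun p => !(p == "")))
        (String.ofList s) with
    | false => rfl
    | true =>
        exfalso
        have hmem := (PySem.Set.contains_iff _ _).mp hcc
        rw [PySem.Set.mem_ofList, List.mem_filter] at hmem
        exact h ⟨String.ofList s, hmem.1, by simp⟩

theorem memT_length_le (parts : List String) (s : List Char)
    (h : memT (buildTrie parts) s = true) (hs : s ≠ []) :
    s.length ≤ ((PySem.Set.ofList (parts.filter (fun p => !(p == "")))).map
      (fun p => p.toList.length)).foldl max 0 := by
  rw [memT_buildTrie, List.any_eq_true] at h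
  obtain ⟨p, hp, hps⟩ := h
  rw [beq_iff_eq] at hps
  have hmem : p ∈ PySem.Set.ofList (parts.filter fun p => !(p == "")) := by
    rw [PySem.Set.mem_ofList, List.mem_filter]
    refine ⟨hp, by
        rcases eq_or_ne p "" with rfl | hne
        · simp at hps; exact absurd hps hs
        · simp [hne] <;> exact hs⟩
  have hmem2 : p.toList.length ∈ (PySem.Set.ofList (parts.filter fun p => !(p == ""))).map
      (fun p => p.toList.length) := List.mem_map_of_mem hmem
  have := (PySem.List.le_foldl_max ((PySem.Set.ofList (parts.filter fun p => !(p == ""))).map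
      (fun p => p.toList.length)) 0).2 _ hmem2
  rw [hps] at this
  exact this

-- ---- per-word equivalence ----

def stepA (tree : Trie) (word : String) : String :=
  let ret := Trie.customSearch tree word.toList
  if ret.length = 0 then word
  else
    let idx1 := PySem.List.pyGetD ret 0 0
    let idx2 := PySem.List.pyGetD ret 1 0
    String.ofList
      (PySem.List.slice word.toList none (some idx1) ++
       '[' :: PySem.List.slice word.toList (some idx1) (some idx2) ++
       ']' :: PySem.List.slice word.toList (some idx2) none)

def stepB (pset : PySem.Set String) (maxlen : Nat) (word : String) : String :=
  match bestLoopL word.toList pset (min maxlen word.toList.length) with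
  | none => word
  | some (j, k) => String.ofList
      (word.toList.take j ++ '[' :: ((word.toList.drop j).take (k - j)) ++ ']' :: word.toList.drop k)

theorem perWord (parts : List String) (word : String) :
    stepA (buildTrie parts) word
      = stepB (PySem.Set.ofList (parts.filter (fun p => !(p == ""))))
          (((PySem.Set.ofList (parts.filter (fun p => !(p == "")))).map
             (fun p => p.toList.length)).foldl max 0) word := by
  have hlw : word.toList.length = word.length := by simp
  set pset := PySem.Set.ofList (parts.filter (fun p => !(p == ""))) with hpset
  set maxlen := (pset.map (fun p => p.toList.length)).foldl max 0 with hmaxlen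
  have hQle : ∀ i L, 0 < L → QB word.toList pset i L →
      L ≤ bestLen (buildTrie parts) (word.toList.drop i) ∧ i < word.toList.length := by
    intro i L hL hQ
    obtain ⟨hle, hcont⟩ := hQ
    have hlen : ((word.toList.drop i).take L).length = L := by
      simp [List.length_take, List.length_drop]; omega
    have hne : (word.toList.drop i).take L ≠ [] := by
      intro hnil; rw [hnil] at hlen; simp at hlen; omega
    rw [hpset, contains_iff_memT parts _ hne] at hcont
    refine ⟨le_bestLen _ _ _ hL (by simp [List.length_drop]; omega) hcont, by omega⟩
  obtain ⟨heq, hz⟩ | ⟨js, hjs, heq, hpos, hmax, hfirst⟩ :=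
    foldA_inv (buildTrie parts) word.toList word.toList.length
  · have hB : bestLoopL word.toList pset (min maxlen word.toList.length) = none := by
      apply bestLoopL_none
      intro L hL _ i hQ
      obtain ⟨hle2, hlt⟩ := hQle i L hL hQ
      rw [hz i hlt] at hle2; omega
    simp only [stepA, stepB, Trie.customSearch]
    rw [heq, hB]
    norm_num
  · set M := bestLen (buildTrie parts) (word.toList.drop js) with hM
    have hMle : M ≤ word.toList.length - js := by
      have := bestLen_le (buildTrie parts) (word.toList.drop js)
      simpa using this
    have hsub : ((word.toList.drop js).take M).length = M := by simp; omega
    have hsubne : (word.toList.drop js).take M ≠ [] := by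
      intro hnil; rw [hnil] at hsub; simp at hsub; omega
    have hmemM : memT (buildTrie parts) ((word.toList.drop js).take M) = true := bestLen_mem _ _ hpos
    have hq : QB word.toList pset js M :=
      ⟨by omega, by rw [hpset, contains_iff_memT parts _ hsubne]; exact hmemM⟩
    have hMmax : M ≤ maxlen := by
      have := memT_length_le parts _ hmemM hsubne
      rw [hsub] at this
      exact this
    have hB : bestLoopL word.toList pset (min maxlen word.toList.length) = some (js, js + M) := by
      apply bestLoopL_some _ _ _ _ _ hpos (le_min hMmax (by omega)) hq
      · intro i hi hQ
        obtain ⟨h1, h2⟩ := hQle i M hpos hQ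
        have := hfirst i hi; omega
      · intro L hL i hQ
        obtain ⟨h1, h2⟩ := hQle i L (by omega) hQ
        have := hmax i h2; omega
    simp only [stepA, stepB, Trie.customSearch]
    rw [heq, hB]
    rw [if_pos (by show (0 : Int) < (M : Int); exact_mod_cast hpos : ((js : Int), (M : Int)).2 > 0)]
    rw [if_neg (by simp)]
    have hcast : (js : Int) + (M : Int) = ((js + M : Nat) : Int) := by push_cast; ring
    rw [PySem.List.pyGetD_zero_cons]
    have hidx2 : PySem.List.pyGetD [((js : Nat) : Int), (js : Int) + (M : Int)] 1 0
        = (js : Int) + (M : Int) := by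
      simp [PySem.List.pyGetD, PySem.List.pyGet?, PySem.List.pyIdx?]
    rw [hidx2]
    congr 1
    rw [PySem.List.slice_to_natCast, PySem.List.slice_natCast_add, hcast,
        PySem.List.slice_from_natCast]
    simp

-- ---- the in-place rewriting loop of A is a map ----

theorem findA_aux (tree : Trie) (ws : List String) :
    ∀ (acc : List String) (s : Nat), acc.length = s + ws.length → acc.drop s = ws →
    (PySem.List.enumerate ws (s : Int)).foldl
      (fun ws iw =>
        let ret := Trie.customSearch tree iw.2.toList
        if ret.length = 0 then ws
        else
          let idx1 := PySem.List.pyGetD ret 0 0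
          let idx2 := PySem.List.pyGetD ret 1 0
          PySem.List.pySetD ws iw.1 (String.ofList
            (PySem.List.slice iw.2.toList none (some idx1) ++
             '[' :: PySem.List.slice iw.2.toList (some idx1) (some idx2) ++
             ']' :: PySem.List.slice iw.2.toList (some idx2) none))) acc
      = acc.take s ++ ws.map (stepA tree) := by
  induction ws with
  | nil =>
      intro acc s hlen hdrop
      rw [PySem.List.enumerate_nil, List.foldl_nil, List.map_nil, List.append_nil]
      simp at hlen
      exact (List.take_of_length_le (by omega)).symm
  | cons word ws ih =>
      intro acc s hlen hdrop
      rw [PySem.List.enumerate_cons, List.foldl_cons]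
      have hslt : s < acc.length := by simp at hlen; omega
      have hget? : acc[s]? = some word := by
        have h0 := congrArg (fun l => l[0]?) hdrop
        simpa [List.getElem?_drop] using h0
      have hgetl : acc[s]'hslt = word := by
        have := List.getElem?_eq_getElem hslt
        rw [this] at hget?
        exact Option.some.inj hget?
      have hstep :
          (let ret := Trie.customSearch tree ((s : Int), word).2.toList
           if ret.length = 0 then acc
           else
             let idx1 := PySem.List.pyGetD ret 0 0
             let idx2 := PySem.List.pyGetD ret 1 0
             PySem.List.pySetD acc ((s : Int), word).1 (String.ofList
               (PySem.List.slice ((s : Int), word).2.toList none (some idx1) ++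
                '[' :: PySem.List.slice ((s : Int), word).2.toList (some idx1) (some idx2) ++
                ']' :: PySem.List.slice ((s : Int), word).2.toList (some idx2) none)))
            = acc.set s (stepA tree word) := by
        by_cases hr : (Trie.customSearch tree word.toList).length = 0
        · simp only [stepA, if_pos hr]
          rw [← hgetl, List.set_getElem_self]
        · simp only [stepA, if_neg hr, PySem.List.pySetD_natCast]
      rw [hstep]
      have hdrop2 : (acc.set s (stepA tree word)).drop (s + 1) = ws := by
        rw [List.drop_set_of_lt]
        · have h1 : (acc.drop s).drop 1 = acc.drop (s + 1) := by rw [List.drop_drop]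
          rw [← h1, hdrop, List.drop_one, List.tail_cons]
        · omega
      have hind := ih (acc.set s (stepA tree word)) (s + 1) (by simp at hlen ⊢; omega) hdrop2
      have hcast : ((s : Int) + 1) = ((s + 1 : Nat) : Int) := by push_cast; ring
      rw [hcast, hind]
      have htake : (acc.set s (stepA tree word)).take (s + 1) = acc.take s ++ [stepA tree word] := by
        rw [List.set_eq_take_append_cons_drop, if_pos hslt]
        rw [List.take_append]
        have h1 : (acc.take s).take (s + 1) = acc.take s := by
          rw [List.take_take]; congr 1; omega
        have h2 : s + 1 - (acc.take s).length = 1 := by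
          rw [List.length_take]; omega
        rw [h1, h2, List.take_cons, List.take_zero]
        omega
      rw [htake, List.map_cons]
      simp

theorem findA_map (words parts : List String) :
    findSubstrings words parts = words.map (stepA (buildTrie parts)) := by
  simp only [findSubstrings]
  have h := findA_aux (buildTrie parts) words words 0 (by simp) (by simp)
  simpa using h

theorem findB_map (words parts : List String) :
    findSubstrings_alt words parts
      = words.map (stepB (PySem.Set.ofList (parts.filter (fun p => !(p == ""))))
          (((PySem.Set.ofList (parts.filter (fun p => !(p == "")))).map
             (fun p => p.toList.length)).foldl max 0)) := by
  rfl

-- ===== VERDICT (by name: the statement is the Claim_ definition above) =====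
theorem findSubstrings_spec : Claim_equal_findSubstrings := by
  intro words parts _
  unfold Spec_findSubstrings
  rw [findA_map, findB_map]
  exact List.map_congr_left (fun word _ => perWord parts word)
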